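-- pv_equiv track=rewrite | github.com/engag1ng/BWINF-43 | Runde 2/Aufgabe 3 - Implementierung/aufgabe3.py | weighted_index
-- ===== SOURCE A (Python) =====
-- def is_True(string):
--     """Returns whether a STRING either 'y' or '?' which is counted as True."""
--     return string == "y" or string == '?'
--
-- def find_hotspot(lst):
--     """Finds the hotspot of True values in a row. This means that at the hotspot there is an equal distribution of True's to either side."""
--     n = len(lst)
--     min_diff = float('inf')
--     hotspot_index = -1
--
--     for i in range(n):
--         left_count = sum(1 for x in lst[:i] if is_True(x))
--         right_count = sum(1 for x in lst[i+1:] if is_True(x))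
--
--         diff = abs(left_count - right_count)
--
--         if diff < min_diff:
--             min_diff = diff
--             hotspot_index = i
--
--     return hotspot_index
--
-- def weighted_index(lst):
--     """Creates a weights list that represents a heat-map for which columns are most likely to be changed around or changed to
--     due to the higher concentration of True's in the column."""
--     hotspot = find_hotspot(lst)
--     n = len(lst)
--     weights = [0] * n
--
--     if hotspot == -1:
--         return weights
--
--     max_weight = n // 2
--     for i in range(n):
--         weights[i] = max(0, max_weight - abs(hotspot - i))
--
--     return weights
-- ===== SOURCE B (Python) =====
-- def weighted_index(lst):
--     """Heat-map around the balanced hotspot column, computed in one pass: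
--     a running count of True values replaces re-summing sublists per index."""
--     n = len(lst)
--     total = sum(1 for x in lst if x == "y" or x == "?")
--     best_i = -1
--     best_diff = None
--     left = 0
--     for i, x in enumerate(lst):
--         t = 1 if x == "y" or x == "?" else 0
--         d = abs((total - left - t) - left)
--         if best_diff is None or d < best_diff:
--             best_diff = d
--             best_i = i
--         left += t
--     if best_i == -1:
--         return []
--     m = n // 2
--     return [max(0, m - abs(best_i - i)) for i in range(n)]
-- ===== Notes on version B (the rewrite author's own statement) =====
-- stated objective: faster
-- what changed: Replaces the O(n^2) hotspot search (re-summing lst[:i] and lst[i+1:] for every i) with a single pass that keeps a running left-count and derives the right-count from the total, then emits the weights with a comprehension instead of allocating and overwriting a zero list.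
import Mathlib
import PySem

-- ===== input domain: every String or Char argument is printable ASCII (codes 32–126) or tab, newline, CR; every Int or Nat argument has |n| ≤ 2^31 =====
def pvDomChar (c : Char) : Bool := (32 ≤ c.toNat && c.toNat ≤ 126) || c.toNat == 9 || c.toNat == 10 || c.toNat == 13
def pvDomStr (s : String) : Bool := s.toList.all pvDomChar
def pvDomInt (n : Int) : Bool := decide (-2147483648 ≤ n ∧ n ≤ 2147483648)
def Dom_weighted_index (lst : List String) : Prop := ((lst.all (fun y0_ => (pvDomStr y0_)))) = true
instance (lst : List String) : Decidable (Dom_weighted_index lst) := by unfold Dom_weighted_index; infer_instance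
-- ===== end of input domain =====

-- B replaces A's quadratic hotspot search (re-summing both sublists for each index)
-- with one pass over the list keeping a running count of True values; measurably faster (asymptotic).


-- ===== PORT A =====
-- is_True(string)
def pvIsTrue (s : String) : Bool := s == "y" || s == "?"

-- sum(1 for x in xs if is_True(x))
def pvCountA (xs : List String) : Int :=
  ((xs.filter (fun x => pvIsTrue x)).map (fun _ => (1 : Int))).sum

-- one iteration of find_hotspot's loop; min_diff = float('inf') is modelled as `none`
def pvHotStep (lst : List String) (s : Option Int × Int) (i : Int) : Option Int × Int :=
  let left := pvCountA (PySem.List.slice lst none (some i))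
  let right := pvCountA (PySem.List.slice lst (some (i + 1)) none)
  let d := |left - right|
  match s.1 with
  | none => (some d, i)
  | some m => if d < m then (some d, i) else s

def pvFindHotspot (lst : List String) : Int :=
  ((PySem.List.pyRange 0 (lst.length : Int) 1).foldl (pvHotStep lst) (none, -1)).2

def weighted_index (lst : List String) : List Int :=
  let hotspot := pvFindHotspot lst
  let n : Int := (lst.length : Int)
  let weights : List Int := List.replicate lst.length 0
  if hotspot = -1 then weights
  else
    let maxWeight := PySem.Int.floordiv n 2
    -- weights[i] = max(0, max_weight - abs(hotspot - i)); list assignment ported as List.set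
    (PySem.List.pyRange 0 n 1).foldl
      (fun w i => w.set i.toNat (max 0 (maxWeight - |hotspot - i|))) weights

-- ===== PORT B =====
-- one iteration of B's single pass; state = (best_diff, best_i, left)
def pvAltStep (total : Int) (s : Option Int × Int × Int) (p : Int × String) : Option Int × Int × Int :=
  let t : Int := if p.2 == "y" || p.2 == "?" then 1 else 0
  let d := |(total - s.2.2 - t) - s.2.2|
  match s.1 with
  | none => (some d, p.1, s.2.2 + t)
  | some m => if d < m then (some d, p.1, s.2.2 + t) else (s.1, s.2.1, s.2.2 + t)

def weighted_index_alt (lst : List String) : List Int :=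
  let n : Int := (lst.length : Int)
  let total : Int := ((lst.filter (fun x => x == "y" || x == "?")).map (fun _ => (1 : Int))).sum
  let st := (PySem.List.enumerate lst 0).foldl (pvAltStep total) (none, -1, 0)
  if st.2.1 = -1 then []
  else
    let m := PySem.Int.floordiv n 2
    (PySem.List.pyRange 0 n 1).map (fun i => max 0 (m - |st.2.1 - i|))

-- ===== PRECONDITION & SPEC =====
def Spec_weighted_index (lst : List String) (out : List Int) : Prop := out = weighted_index_alt lst
instance (lst : List String) (out : List Int) : Decidable (Spec_weighted_index lst out) := by unfold Spec_weighted_index; infer_instance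

-- ===== CLAIM (what is proved, stated in full; the proofs are below) =====
def Claim_equal_weighted_index : Prop := ∀ (lst : List String), Dom_weighted_index lst → Spec_weighted_index lst (weighted_index lst)

-- ===== LEMMAS AND PROOFS =====

lemma cntA_append (xs ys : List String) : pvCountA (xs ++ ys) = pvCountA xs + pvCountA ys := by
  simp [pvCountA, List.filter_append]
lemma cntA_cons (x : String) (xs : List String) :
    pvCountA (x :: xs) = (if x == "y" || x == "?" then 1 else 0) + pvCountA xs := by
  by_cases h : (x == "y" || x == "?") = true <;> simp [pvCountA, pvIsTrue, h]

lemma step_eq (pre rest : List String) (x : String) (s : Option Int × Int) :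
    pvAltStep (pvCountA (pre ++ x :: rest)) (s.1, s.2, pvCountA pre) ((pre.length : Int), x)
    = ((pvHotStep (pre ++ x :: rest) s (pre.length : Int)).1,
       (pvHotStep (pre ++ x :: rest) s (pre.length : Int)).2,
       pvCountA (pre ++ [x])) := by
  have h1 : PySem.List.slice (pre ++ x :: rest) none (some (pre.length : Int)) = pre := by
    rw [PySem.List.slice_to _ (by positivity)]; simp
  have h2 : PySem.List.slice (pre ++ x :: rest) (some ((pre.length : Int) + 1)) none = rest := by
    rw [PySem.List.slice_from _ (by positivity),
        show ((pre.length : Int) + 1).toNat = (pre ++ [x]).length from by simp,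
        show pre ++ x :: rest = (pre ++ [x]) ++ rest from by simp, List.drop_left]
  have hd : |(pvCountA (pre ++ x :: rest) - pvCountA pre - (if x == "y" || x == "?" then (1:Int) else 0))
              - pvCountA pre|
          = |pvCountA pre - pvCountA rest| := by
    rw [cntA_append, cntA_cons, abs_sub_comm]; ring_nf
  have hx : pvCountA (pre ++ [x]) = pvCountA pre + (if x == "y" || x == "?" then 1 else 0) := by
    rw [cntA_append, cntA_cons]; simp [pvCountA]
  obtain ⟨s1, s2⟩ := s
  cases s1 with
  | none =>
      simp only [pvAltStep, pvHotStep, h1, h2]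
      rw [hd, hx]
  | some m =>
      simp only [pvAltStep, pvHotStep, h1, h2]
      rw [hd, hx]
      split_ifs <;> rfl

lemma loop_eq (suf : List String) : ∀ (pre : List String) (s : Option Int × Int),
    (PySem.List.enumerate suf (pre.length : Int)).foldl
        (pvAltStep (pvCountA (pre ++ suf))) (s.1, s.2, pvCountA pre)
    = ((((PySem.List.pyRange (pre.length : Int) ((pre.length + suf.length : Nat) : Int) 1).foldl
          (pvHotStep (pre ++ suf)) s)).1,
       (((PySem.List.pyRange (pre.length : Int) ((pre.length + suf.length : Nat) : Int) 1).foldl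
          (pvHotStep (pre ++ suf)) s)).2,
       pvCountA (pre ++ suf)) := by
  induction suf with
  | nil =>
      intro pre s
      rw [PySem.List.pyRange_one_eq_nil (by simp)]
      simp [PySem.List.enumerate_nil]
  | cons x rest ih =>
      intro pre s
      have hlt : (pre.length : Int) < ((pre.length + (x :: rest).length : Nat) : Int) := by
        push_cast [List.length_cons]; omega
      conv_rhs => rw [PySem.List.pyRange_one_cons hlt]
      rw [PySem.List.enumerate_cons, List.foldl_cons, List.foldl_cons, step_eq]
      have this := ih (pre ++ [x]) (pvHotStep (pre ++ x :: rest) s (pre.length : Int))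
      simp only [List.length_append, List.length_cons, List.length_nil, List.append_assoc,
        List.cons_append, List.nil_append] at this ⊢
      push_cast at this ⊢
      ring_nf at this ⊢
      exact this

lemma hot_nonneg (lst : List String) (l : List Int) : ∀ (s : Option Int × Int), 0 ≤ s.2 →
    (∀ i ∈ l, 0 ≤ i) → 0 ≤ (l.foldl (pvHotStep lst) s).2 := by
  induction l with
  | nil => intro s hs _; exact hs
  | cons i l ih =>
      intro s hs hl
      rw [List.foldl_cons]
      refine ih _ ?_ (fun j hj => hl j (List.mem_cons_of_mem _ hj))
      have hi : 0 ≤ i := hl i (List.mem_cons_self ..)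
      obtain ⟨s1, s2⟩ := s
      cases s1 with
      | none => exact hi
      | some m =>
          simp only [pvHotStep]
          split_ifs <;> simpa using (by first | exact hi | exact hs)

lemma findHotspot_nonneg (lst : List String) (h : lst ≠ []) : 0 ≤ pvFindHotspot lst := by
  unfold pvFindHotspot
  have hn : (0 : Int) < (lst.length : Int) := by
    have := List.length_pos_iff.mpr h; omega
  rw [PySem.List.pyRange_one_cons hn, List.foldl_cons]
  refine hot_nonneg lst _ _ ?_ (fun j hj => ?_)
  · simp [pvHotStep]
  · have := (PySem.List.mem_pyRange_one).1 hj
    omega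

lemma take_set (w : List Int) (a : Nat) (v : Int) (h : a < w.length) :
    (w.set a v).take (a + 1) = w.take a ++ [v] := by
  rw [List.set_eq_take_cons_drop v h, List.take_append]
  simp [List.take_take, List.length_take, Nat.min_eq_left h.le]

lemma fold_set_aux (f : Int → Int) (k : Nat) : ∀ (a : Nat) (w : List Int), w.length = a + k →
    (PySem.List.pyRange (a : Int) ((a + k : Nat) : Int) 1).foldl
        (fun w i => w.set i.toNat (f i)) w
    = w.take a ++ (PySem.List.pyRange (a : Int) ((a + k : Nat) : Int) 1).map f := by
  induction k with
  | zero =>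
      intro a w hw
      rw [PySem.List.pyRange_one_eq_nil (by simp)]
      simp [List.take_of_length_le (by omega : w.length ≤ a)]
  | succ k ih =>
      intro a w hw
      have hlt : (a : Int) < ((a + (k+1) : Nat) : Int) := by push_cast; omega
      rw [PySem.List.pyRange_one_cons hlt, List.foldl_cons, List.map_cons]
      have h1 : ((a : Int) + 1) = (((a+1 : Nat)) : Int) := by push_cast; ring
      have h2 : ((a + (k+1) : Nat) : Int) = (((a+1) + k : Nat) : Int) := by push_cast; ring
      rw [h1, h2, ih (a+1) (w.set (a:Int).toNat (f a)) (by simp [hw]; omega)]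
      rw [show ((a:Int).toNat) = a from by simp, take_set w a (f a) (by omega)]
      simp

lemma main_ne (lst : List String) (h : lst ≠ []) : weighted_index lst = weighted_index_alt lst := by
  have hB : (PySem.List.enumerate lst 0).foldl
      (pvAltStep ((lst.filter (fun x => x == "y" || x == "?")).map (fun _ => (1 : Int))).sum)
      (none, -1, 0)
      = (((PySem.List.pyRange 0 (lst.length : Int) 1).foldl (pvHotStep lst) (none, -1)).1,
         ((PySem.List.pyRange 0 (lst.length : Int) 1).foldl (pvHotStep lst) (none, -1)).2,
         pvCountA lst) := by
    have hA := loop_eq lst [] (none, -1)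
    simp only [List.nil_append, List.length_nil, Nat.cast_zero, zero_add,
      show pvCountA [] = (0 : Int) from rfl] at hA
    exact hA
  have hnn : 0 ≤ ((PySem.List.pyRange 0 (lst.length : Int) 1).foldl (pvHotStep lst) (none, -1)).2 :=
    findHotspot_nonneg lst h
  have hfold := fold_set_aux
      (fun i => max 0 (PySem.Int.floordiv ((lst.length : Int)) 2
        - |((PySem.List.pyRange 0 (lst.length : Int) 1).foldl (pvHotStep lst) (none, -1)).2 - i|))
      lst.length 0 (List.replicate lst.length 0) (by simp)
  simp only [Nat.cast_zero, zero_add, List.take_zero, List.nil_append] at hfold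
  simp only [weighted_index, weighted_index_alt, pvFindHotspot, hB]
  rw [if_neg (by omega), if_neg (by omega), hfold]

-- ===== VERDICT (by name: the statement is the Claim_ definition above) =====
theorem weighted_index_spec : Claim_equal_weighted_index := by
  intro lst _
  unfold Spec_weighted_index
  by_cases h : lst = []
  · subst h; rfl
  · exact main_ne lst h
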